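-- pv_equiv track=rewrite | github.com/mombasawalafaizan/dsa_solution | Strings/Intermediate/8_bin_str_into_substr_with_eq_zero_and_one.py | findSubStr
-- ===== SOURCE A (Python) =====
-- def findSubStr(s: str)->int:
--     cnt_zeros=0
--     cnt_ones=0
--     cnt=0
--     i = 0
--     for i in range(len(s)):
--         if s[i]=='0':
--             cnt_zeros+=1
--         elif s[i]=='1':
--             cnt_ones+=1
--         if cnt_zeros==cnt_ones:
--             cnt+=1
--
--     if cnt_zeros==cnt_ones:
--         return cnt
--     else:
--         return -1
-- ===== SOURCE B (Python) =====
-- def findSubStr(s: str) -> int: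
--     # Greedy chunking: repeatedly strip the shortest prefix with equal 0s/1s.
--     n = len(s)
--     count = 0
--     i = 0
--     while i < n:
--         bal = 0
--         j = i
--         while j < n:
--             c = s[j]
--             bal += 1 if c == '0' else -1 if c == '1' else 0
--             j += 1
--             if bal == 0:
--                 break
--         if bal != 0:
--             return -1
--         count += 1
--         i = j
--     return count
-- ===== Notes on version B (the rewrite author's own statement) =====
-- stated objective: alternative
-- what changed: Greedy chunk decomposition: B repeatedly strips the shortest prefix with equal 0s and 1s (nested loops, restarting the balance at 0 for each chunk) and counts chunks, returning -1 as soon as some suffix never balances, instead of A's single pass over the whole string comparing two global counters at every position.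
import Mathlib
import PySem

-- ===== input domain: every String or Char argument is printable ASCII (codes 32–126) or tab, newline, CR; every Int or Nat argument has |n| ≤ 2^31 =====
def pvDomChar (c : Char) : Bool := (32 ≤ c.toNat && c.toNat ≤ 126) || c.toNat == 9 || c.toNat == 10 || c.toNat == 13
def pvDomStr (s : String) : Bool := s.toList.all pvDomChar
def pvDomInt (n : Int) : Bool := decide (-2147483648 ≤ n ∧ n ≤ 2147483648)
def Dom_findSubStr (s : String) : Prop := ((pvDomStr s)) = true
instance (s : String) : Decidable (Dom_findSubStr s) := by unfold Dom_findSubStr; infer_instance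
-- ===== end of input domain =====

-- B re-decomposes the task as greedy chunking (strip the shortest balanced prefix, count chunks, -1 if a suffix never balances) instead of A's single global-counter pass; alternative decomposition, same cost.


-- ===== PORT A =====
-- A's loop over the characters, carrying (cnt_zeros, cnt_ones, cnt)
def findSubStrLoopA : List Char → Int → Int → Int → Int × Int × Int
  | [], z, o, c => (z, o, c)
  | ch :: t, z, o, c =>
    let z' := if ch = '0' then z + 1 else z
    let o' := if ¬ ch = '0' ∧ ch = '1' then o + 1 else o
    let c' := if z' = o' then c + 1 else c
    findSubStrLoopA t z' o' c'

def findSubStr (s : String) : Int :=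
  let r := findSubStrLoopA s.toList 0 0 0
  if r.1 = r.2.1 then r.2.2 else -1

-- ===== PORT B =====
-- the per-character balance step of Source B's inner loop
def findSubStrDelta (c : Char) : Int := if c = '0' then 1 else if c = '1' then -1 else 0

-- Source B's inner while loop: scan the remaining characters carrying bal; return the
-- suffix after the first point where bal hits 0, or none if it never does
def findSubStrChunk : List Char → Int → Option (List Char)
  | [], _ => none
  | ch :: t, bal =>
    let bal' := bal + findSubStrDelta ch
    if bal' = 0 then some t else findSubStrChunk t bal'

-- a consumed chunk is nonempty, so the remaining suffix is strictly shorter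
theorem findSubStrChunk_length : ∀ (l : List Char) (b : Int) (r : List Char),
    findSubStrChunk l b = some r → r.length < l.length := by
  intro l
  induction l with
  | nil => intro b r h; simp [findSubStrChunk] at h
  | cons ch t ih =>
    intro b r h
    simp only [findSubStrChunk] at h
    split at h
    · cases h; simp
    · exact Nat.lt_trans (ih _ r h) (by simp)

-- Source B's outer while loop: strip one balanced chunk at a time, counting them
def findSubStrOuter (l : List Char) (count : Int) : Int :=
  match l with
  | [] => count
  | ch :: t =>
    match h : findSubStrChunk (ch :: t) 0 with
    | none => -1
    | some rest => findSubStrOuter rest (count + 1)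
termination_by l.length
decreasing_by exact findSubStrChunk_length _ _ _ h

def findSubStr_alt (s : String) : Int := findSubStrOuter s.toList 0

-- ===== PRECONDITION & SPEC =====
def Spec_findSubStr (s : String) (out : Int) : Prop := out = findSubStr_alt s
instance (s : String) (out : Int) : Decidable (Spec_findSubStr s out) := by unfold Spec_findSubStr; infer_instance

-- ===== CLAIM (what is proved, stated in full; the proofs are below) =====
def Claim_equal_findSubStr : Prop := ∀ (s : String), Dom_findSubStr s → Spec_findSubStr s (findSubStr s)

-- ===== LEMMAS AND PROOFS =====

-- reference quantities: number of prefix positions with zero balance, and total balance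
def findSubStrZC : List Char → Int → Int
  | [], _ => 0
  | ch :: t, bal =>
    let bal' := bal + findSubStrDelta ch
    (if bal' = 0 then 1 else 0) + findSubStrZC t bal'

def findSubStrSum (l : List Char) : Int := (l.map findSubStrDelta).sum

theorem findSubStrChunk_none (l : List Char) (b : Int) (h : findSubStrChunk l b = none) :
    findSubStrZC l b = 0 ∧ (l ≠ [] → b + findSubStrSum l ≠ 0) := by
  induction l generalizing b with
  | nil => simp [findSubStrZC]
  | cons ch t ih =>
    simp only [findSubStrChunk] at h
    split at h
    · exact absurd h (by simp)
    · rename_i hne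
      obtain ⟨hz, hs⟩ := ih _ h
      refine ⟨by simp [findSubStrZC, hne, hz], fun _ => ?_⟩
      by_cases ht : t = []
      · subst ht; simpa [findSubStrSum] using hne
      · have := hs ht
        simp only [findSubStrSum, List.map_cons, List.sum_cons] at *
        omega

theorem findSubStrChunk_some (l : List Char) (b : Int) (r : List Char)
    (h : findSubStrChunk l b = some r) :
    findSubStrZC l b = 1 + findSubStrZC r 0 ∧ b + findSubStrSum l = findSubStrSum r := by
  induction l generalizing b with
  | nil => simp [findSubStrChunk] at h
  | cons ch t ih =>
    simp only [findSubStrChunk] at h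
    split at h
    · rename_i h0
      cases h
      constructor
      · simp [findSubStrZC, h0]
      · simp only [findSubStrSum, List.map_cons, List.sum_cons]; omega
    · rename_i hne
      obtain ⟨hz, hs⟩ := ih _ h
      constructor
      · simp [findSubStrZC, hne, hz]
      · simp only [findSubStrSum, List.map_cons, List.sum_cons] at *; omega

theorem findSubStrOuter_spec : ∀ (l : List Char) (c : Int),
    findSubStrOuter l c = if findSubStrSum l = 0 then c + findSubStrZC l 0 else -1 := by
  intro l c
  induction hn : l.length using Nat.strong_induction_on generalizing l c with
  | _ n ih =>
    match l with
    | [] => simp [findSubStrOuter, findSubStrSum, findSubStrZC]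
    | ch :: t =>
      rw [findSubStrOuter]
      cases hc : findSubStrChunk (ch :: t) 0 with
      | none =>
        have := (findSubStrChunk_none _ _ hc).2 (by simp)
        simp only [zero_add] at this
        show (-1 : Int) = _
        simp [this]
      | some rest =>
        obtain ⟨hz, hs⟩ := findSubStrChunk_some _ _ _ hc
        simp only [zero_add] at hz hs
        have hlen := findSubStrChunk_length _ _ _ hc
        show findSubStrOuter rest (c + 1) = _
        rw [ih rest.length (hn ▸ hlen) rest (c + 1) rfl, hz, hs]
        split <;> [ring_nf; rfl]

theorem findSubStrLoopA_spec (l : List Char) (z o c : Int) :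
    (findSubStrLoopA l z o c).2.2 = c + findSubStrZC l (z - o)
    ∧ (findSubStrLoopA l z o c).1 - (findSubStrLoopA l z o c).2.1 = (z - o) + findSubStrSum l := by
  induction l generalizing z o c with
  | nil => simp [findSubStrLoopA, findSubStrZC, findSubStrSum]
  | cons ch t ih =>
    have hd : (if ch = '0' then z + 1 else z) - (if ¬ ch = '0' ∧ ch = '1' then o + 1 else o)
        = (z - o) + findSubStrDelta ch := by
      simp only [findSubStrDelta]
      split_ifs <;> first | omega | tauto
    set z' := if ch = '0' then z + 1 else z with hz
    set o' := if ¬ ch = '0' ∧ ch = '1' then o + 1 else o with ho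
    set c' := if z' = o' then c + 1 else c with hc
    have hrec := ih z' o' c'
    have hzo : (z - o) + findSubStrDelta ch = z' - o' := hd.symm
    constructor
    · show (findSubStrLoopA t z' o' c').2.2 = _
      rw [hrec.1]
      simp only [findSubStrZC, hzo, hc]
      by_cases h : z' = o'
      · have h0 : z' - o' = 0 := by omega
        simp [h, h0]; ring
      · have : ¬ z' - o' = 0 := by omega
        simp [h, this]
    · show (findSubStrLoopA t z' o' c').1 - (findSubStrLoopA t z' o' c').2.1 = _
      rw [hrec.2]
      simp only [findSubStrSum, List.map_cons, List.sum_cons] at *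
      omega

-- ===== VERDICT (by name: the statement is the Claim_ definition above) =====
theorem findSubStr_spec : Claim_equal_findSubStr := by
  unfold Claim_equal_findSubStr
  intro s _
  unfold Spec_findSubStr
  simp only [findSubStr, findSubStr_alt]
  rw [findSubStrOuter_spec]
  obtain ⟨hc, hz⟩ := findSubStrLoopA_spec s.toList 0 0 0
  simp only [sub_zero, zero_add] at hc hz
  by_cases ht : findSubStrSum s.toList = 0
  · have : (findSubStrLoopA s.toList 0 0 0).1 = (findSubStrLoopA s.toList 0 0 0).2.1 := by omega
    simp [ht, this, hc]
  · have : ¬ (findSubStrLoopA s.toList 0 0 0).1 = (findSubStrLoopA s.toList 0 0 0).2.1 := by omega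
    simp [ht, this]
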